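-- pv_equiv track=rewrite | github.com/vshalisko/python_at_JetBrainsAcademy | Project_Dominoes/Stage_5.py | snake_count
-- ===== SOURCE A (Python) =====
-- def snake_count(snake):
--   if snake[-1][1] == snake[0][0]:
--       piece_values = [0,1,2,3,4,5,6]
--       piece_dict = dict.fromkeys(piece_values, 0)
--       for piece in snake:
--           piece_dict[piece[0]] += 1
--           piece_dict[piece[1]] += 1
--
--       for key in piece_dict:
--           if piece_dict[key] >= 8 and snake[0][0] == key:
--               return True
--   return False
-- ===== SOURCE B (Python) =====
-- def snake_count(snake):
--     if snake[-1][1] != snake[0][0]: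
--         return False
--     t = snake[0][0]
--     halves = sorted(v for p in snake for v in p)
--     # hand-written bisect_left (A imports nothing, so no bisect module)
--     lo, hi = 0, len(halves)
--     while lo < hi:
--         mid = (lo + hi) // 2
--         if halves[mid] < t:
--             lo = mid + 1
--         else:
--             hi = mid
--     # t occurs >= 8 times iff, in the sorted list, the slot 7 past the first
--     # position >= t still holds t
--     return lo + 7 < len(halves) and halves[lo + 7] == t
-- ===== Notes on version B (the rewrite author's own statement) =====
-- stated objective: alternative
-- what changed: Replaced the fixed 0-6 histogram dict plus key scan by sorting the flattened piece halves and binary-searching (hand-written bisect_left) for the first position of snake[0][0], then checking the element 7 slots later.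
import Mathlib
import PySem

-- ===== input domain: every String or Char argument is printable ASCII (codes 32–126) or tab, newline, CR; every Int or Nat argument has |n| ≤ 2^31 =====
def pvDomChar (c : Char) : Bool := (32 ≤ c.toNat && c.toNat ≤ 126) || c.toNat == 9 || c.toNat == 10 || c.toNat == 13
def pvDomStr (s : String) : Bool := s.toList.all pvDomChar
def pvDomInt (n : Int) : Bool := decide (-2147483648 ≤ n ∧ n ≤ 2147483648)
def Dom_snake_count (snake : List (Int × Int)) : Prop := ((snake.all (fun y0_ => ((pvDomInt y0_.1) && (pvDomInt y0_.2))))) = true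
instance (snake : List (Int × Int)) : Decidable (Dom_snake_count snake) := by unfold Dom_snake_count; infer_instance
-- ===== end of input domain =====

-- B replaces A's fixed 0..6 histogram dict plus key scan by sorting the flattened halves and
-- binary-searching for the first slot of snake[0][0], then checking 7 slots later (objective: alternative).

-- ===== PORT A =====
-- dict.fromkeys([0,1,2,3,4,5,6], 0)
def pyInitDict : PySem.Dict Int Int :=
  PySem.Dict.ofList [((0:Int),(0:Int)),(1,0),(2,0),(3,0),(4,0),(5,0),(6,0)]

-- piece_dict[k] += 1 ; `none` = KeyError (key not present)
def bumpA (od : Option (PySem.Dict Int Int)) (k : Int) : Option (PySem.Dict Int Int) :=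
  match od with
  | none => none
  | some d => if d.contains k then some (d.insert k (d.getD k 0 + 1)) else none

def snake_count (snake : List (Int × Int)) : Bool :=
  match PySem.List.pyGet? snake (-1), PySem.List.pyGet? snake 0 with
  | some lastP, some firstP =>
    if lastP.2 == firstP.1 then
      match snake.foldl (fun od p => bumpA (bumpA od p.1) p.2) (some pyInitDict) with
      | some d => d.keys.any (fun k => decide (8 ≤ d.getD k 0) && decide (firstP.1 = k))
      | none => false   -- KeyError in the loop; excluded by Pre_
    else false
  | _, _ => false       -- IndexError on empty snake; excluded by Pre_

-- ===== PORT B =====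
-- the hand-written bisect_left while-loop of Source B (fuel = the usual totalization guard;
-- the `none` index branch is unreachable while lo < hi ≤ length)
def bsLoop (xs : List Int) (t : Int) : Nat → Nat → Nat → Nat
  | 0, lo, _hi => lo
  | fuel+1, lo, hi =>
    if lo < hi then
      match xs[(lo + hi) / 2]? with
      | some y => if y < t then bsLoop xs t fuel ((lo + hi) / 2 + 1) hi
                  else bsLoop xs t fuel lo ((lo + hi) / 2)
      | none => lo
    else lo

def snake_count_alt (snake : List (Int × Int)) : Bool :=
  match PySem.List.pyGet? snake (-1) with
  | none => false       -- IndexError on empty snake; excluded by Pre_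
  | some lastP =>
   match PySem.List.pyGet? snake 0 with
   | none => false
   | some firstP =>
    if lastP.2 != firstP.1 then false
    else
      let t := firstP.1
      let halves := PySem.List.sorted (snake.flatMap (fun p => [p.1, p.2])) id
      let lo := bsLoop halves t halves.length 0 halves.length
      -- `lo + 7 < len(halves) and halves[lo+7] == t` (the `and` short-circuits, so no IndexError)
      match halves[lo + 7]? with
      | some y => y == t
      | none => false

-- ===== PRECONDITION & SPEC =====
-- Pre_ excludes exactly the inputs where A raises: the empty snake (IndexError) and closed-loop
-- snakes containing a piece value outside 0..6 (KeyError on the fixed-key dict).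
def Pre_snake_count (snake : List (Int × Int)) : Prop :=
  snake ≠ [] ∧ ((snake.getLastD (0,0)).2 = (snake.headD (0,0)).1 →
    ∀ p ∈ snake, 0 ≤ p.1 ∧ p.1 ≤ 6 ∧ 0 ≤ p.2 ∧ p.2 ≤ 6)
instance (snake : List (Int × Int)) : Decidable (Pre_snake_count snake) := by
  unfold Pre_snake_count; infer_instance

def pvWitness_snake_count : (List (Int × Int)) := [(1,2),(2,1)]

def Spec_snake_count (snake : List (Int × Int)) (out : Bool) : Prop := out = snake_count_alt snake
instance (snake : List (Int × Int)) (out : Bool) : Decidable (Spec_snake_count snake out) := by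
  unfold Spec_snake_count; infer_instance

-- ===== CLAIM (what is proved, stated in full; the proofs are below) =====
def Claim_equal_snake_count : Prop := ∀ (snake : List (Int × Int)), Dom_snake_count snake → Pre_snake_count snake → Spec_snake_count snake (snake_count snake)

-- ===== LEMMAS AND PROOFS =====

lemma pyGet_zero (h : Int × Int) (t : List (Int × Int)) :
    PySem.List.pyGet? (h :: t) 0 = some h := by
  simp [PySem.List.pyGet?, PySem.List.pyIdx?]

lemma pyGet_neg_one (xs : List (Int × Int)) (h : xs ≠ []) :
    PySem.List.pyGet? xs (-1) = some (xs.getLastD (0,0)) := by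
  have h1 : 1 ≤ xs.length := List.length_pos_iff.mpr h
  obtain ⟨y, hy⟩ := List.getLast?_isSome.mpr h |> Option.isSome_iff_exists.mp
  simp [PySem.List.pyGet?, PySem.List.pyIdx?, h1, ← List.getLast?_eq_getElem?, hy]

lemma mem_set_update (s : PySem.Set Int) (xs : List Int) (t : Int) (h : t ∈ s) :
    t ∈ PySem.Set.update s xs := by
  simp only [PySem.Set.update]
  induction xs generalizing s with
  | nil => simpa
  | cons x xs ih =>
      simp only [List.foldl_cons]
      exact ih _ (by simp [PySem.Set.mem_add]; tauto)

lemma init_contains (x : Int) (h0 : 0 ≤ x) (h6 : x ≤ 6) : pyInitDict.contains x = true := by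
  interval_cases x <;> decide

lemma init_getD (x : Int) (h0 : 0 ≤ x) (h6 : x ≤ 6) : pyInitDict.getD x 0 = 0 := by
  interval_cases x <;> decide

lemma fold_pair_eq (snake : List (Int × Int)) (od : Option (PySem.Dict Int Int)) :
    snake.foldl (fun od p => bumpA (bumpA od p.1) p.2) od
      = (snake.flatMap (fun p => [p.1, p.2])).foldl bumpA od := by
  induction snake generalizing od with
  | nil => rfl
  | cons p t ih => simp [List.flatMap_cons, ih]

lemma bump_fold_some (xs : List Int) (d : PySem.Dict Int Int)
    (h : ∀ x ∈ xs, d.contains x = true) :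
    xs.foldl bumpA (some d)
      = some (xs.foldl (fun d x => d.insert x (d.getD x 0 + 1)) d) := by
  induction xs generalizing d with
  | nil => rfl
  | cons x xs ih =>
      have hx : d.contains x = true := h x (List.mem_cons_self)
      simp only [List.foldl_cons, bumpA, hx, if_pos]
      exact ih _ (fun y hy => by
        rw [PySem.Dict.contains_insert]
        simp [h y (List.mem_cons_of_mem _ hy)])

lemma any_key (ks : List Int) (f : Int → Int) (tg : Int) (htg : tg ∈ ks) :
    ks.any (fun k => decide (8 ≤ f k) && decide (tg = k)) = decide (8 ≤ f tg) := by
  by_cases h8 : 8 ≤ f tg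
  · simp only [h8, decide_true]
    rw [List.any_eq_true]
    exact ⟨tg, htg, by simp [h8]⟩
  · simp only [h8, decide_false]
    rw [List.any_eq_false]
    intro k hk
    simp only [Bool.and_eq_true, decide_eq_true_eq, not_and]
    intro hfk heq
    exact h8 (heq ▸ hfk)

-- Source B's hand-written while-loop is exactly PySem's bisect_left loop
lemma bsLoop_eq (xs : List Int) (t : Int) (fuel lo hi : Nat) :
    bsLoop xs t fuel lo hi = PySem.List.bisectLeftLoop xs t fuel lo hi := by
  induction fuel generalizing lo hi with
  | zero => rfl
  | succ f ih =>
      simp only [bsLoop, PySem.List.bisectLeftLoop]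
      split_ifs with h
      · cases hx : xs[(lo + hi) / 2]? with
        | none => rfl
        | some y => by_cases hy : y < t <;> simp [hy, ih]
      · rfl

-- a sorted list whose elements are all ≥ t is a block of t's followed by elements > t
lemma sorted_ge_decomp (d : List Int) (t : Int)
    (hp : d.Pairwise (· ≤ ·)) (hge : ∀ x ∈ d, t ≤ x) :
    ∃ k rest, d = List.replicate k t ++ rest ∧ ∀ x ∈ rest, t < x := by
  induction d with
  | nil => exact ⟨0, [], rfl, by simp⟩
  | cons x d ih =>
      rcases List.pairwise_cons.mp hp with ⟨hx, hp'⟩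
      by_cases hxt : x = t
      · obtain ⟨k, rest, hd, hrest⟩ :=
          ih hp' (fun y hy => hge y (List.mem_cons_of_mem _ hy))
        exact ⟨k + 1, rest, by simp [hxt, hd, List.replicate_succ], hrest⟩
      · have htx : t < x :=
          lt_of_le_of_ne (hge x List.mem_cons_self) (fun h => hxt h.symm)
        exact ⟨0, x :: d, by simp, fun y hy => by
          rcases List.mem_cons.mp hy with rfl | hy
          · exact htx
          · exact lt_of_lt_of_le htx (hx y hy)⟩

-- core B-side fact: with hs sorted and lo = bisect_left hs t, the slot test is count ≥ 8
lemma bisect_slot_eq_count (hs : List Int) (t : Int) (hp : hs.Pairwise (· ≤ ·)) :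
    (match hs[PySem.List.bisectLeft hs t + 7]? with
     | some y => y == t
     | none => false) = decide (8 ≤ hs.count t) := by
  obtain ⟨hle, hlt, hge⟩ := PySem.List.bisectLeft_spec hs t hp
  set lo := PySem.List.bisectLeft hs t with hlo
  -- split hs at lo
  have hsplit : hs = hs.take lo ++ hs.drop lo := (List.take_append_drop lo hs).symm
  have hcount_take : (hs.take lo).count t = 0 := by
    rw [List.count_eq_zero]
    intro hmem
    obtain ⟨j, hj, hjt⟩ := List.mem_iff_getElem.mp hmem
    have hjlo : j < lo := lt_of_lt_of_le hj (by simp [List.length_take])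
    have hjlen : j < hs.length := lt_of_lt_of_le hjlo hle
    have := hlt j hjlen hjlo
    rw [List.getElem_take] at hjt
    omega
  set d := hs.drop lo with hd
  have hpd : d.Pairwise (· ≤ ·) := hp.sublist (List.drop_sublist _ _)
  have hged : ∀ x ∈ d, t ≤ x := by
    rw [hd]
    intro x hx
    obtain ⟨j, hj, hjt⟩ := List.mem_iff_getElem.mp hx
    have hjlen : lo + j < hs.length := by
      rw [List.length_drop] at hj; omega
    have := hge (lo + j) hjlen (by omega)
    rw [List.getElem_drop] at hjt
    omega
  obtain ⟨k, rest, hdk, hrest⟩ := sorted_ge_decomp d t hpd hged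
  have hidx : hs[lo + 7]? = d[7]? := by rw [hd, List.getElem?_drop]
  have hcount : hs.count t = k := by
    conv_lhs => rw [hsplit]
    rw [List.count_append, hcount_take, hdk, List.count_append, List.count_replicate]
    have : rest.count t = 0 := by
      rw [List.count_eq_zero]
      intro hmem
      exact absurd (hrest t hmem) (lt_irrefl t)
    simp [this]
  rw [hidx, hdk, hcount]
  by_cases h8 : 8 ≤ k
  · have h7k : 7 < k := by omega
    have h7 : 7 < (List.replicate k t).length := by simpa using h7k
    rw [List.getElem?_append_left h7, List.getElem?_replicate, if_pos h7k]
    simp [h8]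
  · rw [List.getElem?_append_right (by simp; omega)]
    cases hr : rest[7 - (List.replicate k t).length]? with
    | none => simp [h8]
    | some y =>
        have hy : y ∈ rest := List.mem_of_getElem? hr
        have : t < y := hrest y hy
        simp [h8, this.ne']

-- ===== VERDICT (by name: the statement is the Claim_ definition above) =====
theorem snake_count_spec : Claim_equal_snake_count := by
  intro snake _ hpre
  obtain ⟨hne, hbound⟩ := hpre
  obtain ⟨h, t, rfl⟩ := List.exists_cons_of_ne_nil hne
  unfold Spec_snake_count snake_count snake_count_alt
  rw [pyGet_zero, pyGet_neg_one _ hne]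
  set L := ((h :: t).getLastD (0,0)) with hL
  by_cases hg : L.2 = h.1
  · have hbd := hbound (by simpa using hg)
    simp only [hg, beq_self_eq_true, if_pos, bne_self_eq_false, Bool.false_eq_true,
      if_false]
    set flat := ((h :: t).flatMap (fun p => [p.1, p.2])) with hh
    have hmem : ∀ x ∈ flat, 0 ≤ x ∧ x ≤ 6 := by
      intro x hx
      rw [hh, List.mem_flatMap] at hx
      obtain ⟨p, hp, hxp⟩ := hx
      have := hbd p hp
      simp only [List.mem_cons, List.not_mem_nil, or_false] at hxp
      rcases hxp with rfl | rfl <;> omega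
    -- A-side: the dict fold succeeds and its target entry is the count
    rw [fold_pair_eq, bump_fold_some _ _
      (fun x hx => init_contains x (hmem x hx).1 (hmem x hx).2)]
    have htgb := hbd h (List.mem_cons_self)
    have htg : h.1 ∈ (flat.foldl (fun d x => d.insert x (d.getD x 0 + 1)) pyInitDict).keys := by
      rw [PySem.Dict.keys_foldl_insert]
      exact mem_set_update _ _ _ (by
        have h1 := htgb.1; have h2 := htgb.2.1
        interval_cases h1 : h.1 <;> decide)
    simp only [any_key _ _ _ htg, PySem.Dict.getD_foldl_insert_add_one]
    rw [init_getD _ htgb.1 htgb.2.1]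
    -- B-side: the sorted list with the bisect slot test
    set hs := PySem.List.sorted flat id with hhs
    have hcount : hs.count h.1 = flat.count h.1 :=
      (PySem.List.sorted_perm flat id false).count_eq h.1
    have hpw : hs.Pairwise (· ≤ ·) := by
      have := PySem.List.sorted_pairwise (κ := Int) flat id
      simpa using this
    rw [show bsLoop hs h.1 hs.length 0 hs.length = PySem.List.bisectLeft hs h.1 from
      (bsLoop_eq hs h.1 hs.length 0 hs.length).trans rfl]
    rw [bisect_slot_eq_count hs h.1 hpw, hcount]
    simp only [decide_eq_decide]
    omega
  · simp [bne_iff_ne, Ne, hg]
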